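-- pv_equiv track=rewrite | github.com/vonnan/Leetcode | 2355-maximum-number-of-books-you-can-take/2355-maximum-number-of-books-you-can-take.py | maximumBooks
-- ===== SOURCE A (Python) =====
-- from typing import List
--
-- def maximumBooks(books: List[int]) -> int:
--     stack = []
--     res = books[0]
--     for i, book in enumerate(books):
--         while stack and  books[stack[-1][0]] >= book - (i - stack[-1][0]):
--             stack.pop()
--
--         prev_idx, prev_val = -1, 0
--         if stack:
--             prev_idx, prev_val = stack[-1]
--         h = min((i - prev_idx), book)
--         ct = prev_val + h * (book + book - h + 1)//2
--         res = max(res, ct)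
--         stack.append((i, ct))
--
--     return res
-- ===== SOURCE B (Python) =====
-- from typing import List
--
-- def maximumBooks(books: List[int]) -> int:
--     # For each shelf i, find the boundary by a plain backward scan (no stack),
--     # then dp[i] = dp[boundary] + arithmetic-series sum ending at books[i].
--     res = books[0]
--     dp = []
--     for i, b in enumerate(books):
--         a = b - i
--         j = i - 1
--         while j >= 0 and books[j] - j >= a:
--             j -= 1
--         h = min(i - j, b)
--         cur = (dp[j] if j >= 0 else 0) + h * (2 * b - h + 1) // 2
--         dp.append(cur)
--         res = max(res, cur)
--     return res
-- ===== Notes on version B (the rewrite author's own statement) =====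
-- stated objective: simpler
-- what changed: B removes A's monotonic stack entirely: for each shelf it finds the dp boundary by a plain backward linear scan (j -= 1 while books[j]-j >= books[i]-i) and keeps a dp table indexed by position, trading A's amortized O(n) stack pass for a shorter brute-force-scan DP.
-- outside the precondition, e.g. on maximumBooks([]): A raises IndexError, B raises IndexError
import Mathlib
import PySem

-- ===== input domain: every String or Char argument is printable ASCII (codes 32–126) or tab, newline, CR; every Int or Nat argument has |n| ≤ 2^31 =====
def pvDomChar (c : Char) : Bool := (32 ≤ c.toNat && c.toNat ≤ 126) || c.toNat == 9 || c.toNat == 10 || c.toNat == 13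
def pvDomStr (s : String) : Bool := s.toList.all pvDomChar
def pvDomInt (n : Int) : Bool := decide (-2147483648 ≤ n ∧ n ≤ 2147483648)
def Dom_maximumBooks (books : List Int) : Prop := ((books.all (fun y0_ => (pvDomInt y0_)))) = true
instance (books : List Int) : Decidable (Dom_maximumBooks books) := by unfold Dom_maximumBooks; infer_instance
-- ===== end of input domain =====

-- B drops A's monotonic stack entirely: for each i it finds the dp boundary by a plain
-- backward scan and keeps a dp table (objective: simpler; O(n^2) worst case vs A's O(n)).

-- ===== PORT A =====
-- the 'while stack and books[stack[-1][0]] >= book - (i - stack[-1][0]): stack.pop()' loop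
def popA (books : List Int) (i book : Int) : List (Int × Int) → List (Int × Int)
  | [] => []
  | (j, v) :: rest =>
    if PySem.List.pyGetD books j 0 ≥ book - (i - j) then popA books i book rest
    else (j, v) :: rest

-- 'for i, book in enumerate(books)': stack top = list head; indices always in range, so books[...] is pyGetD
def loopA (books : List Int) : Int → List Int → List (Int × Int) → Int → Int
  | _, [], _, res => res
  | i, book :: rest, stack, res =>
    let stack' := popA books i book stack
    let p := match stack' with | [] => ((-1 : Int), (0 : Int)) | q :: _ => q
    let h := min (i - p.1) book
    let ct := p.2 + PySem.Int.floordiv (h * (book + book - h + 1)) 2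
    loopA books (i + 1) rest ((i, ct) :: stack') (max res ct)

def maximumBooks (books : List Int) : Int :=
  loopA books 0 books [] ((PySem.List.pyGet? books 0).getD 0)

-- ===== PORT B =====
-- the 'j = i - 1; while j >= 0 and books[j] - j >= a: j -= 1' backward scan; fuel = j + 1
def scanB (books : List Int) (a : Int) : Nat → Int
  | 0 => -1
  | j + 1 => if PySem.List.pyGetD books (j : Int) 0 - (j : Int) ≥ a then scanB books a j else (j : Int)

-- 'for i, b in enumerate(books)' with dp table; dp indices are in range, so dp[j] is pyGetD
def loopB (books : List Int) : Nat → List Int → List Int → Int → Int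
  | _, [], _, res => res
  | i, b :: rest, dp, res =>
    let l := scanB books (b - (i : Int)) i
    let pv := if l ≥ 0 then PySem.List.pyGetD dp l 0 else 0
    let h := min ((i : Int) - l) b
    let cur := pv + PySem.Int.floordiv (h * (2 * b - h + 1)) 2
    loopB books (i + 1) rest (dp ++ [cur]) (max res cur)

def maximumBooks_alt (books : List Int) : Int :=
  loopB books 0 books [] ((PySem.List.pyGet? books 0).getD 0)

-- ===== PRECONDITION & SPEC =====
-- Pre_ excludes only the empty list, on which Python A raises IndexError at 'books[0]' (B raises there too).
def Pre_maximumBooks (books : List Int) : Prop := books ≠ []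
instance (books : List Int) : Decidable (Pre_maximumBooks books) := by unfold Pre_maximumBooks; infer_instance
def pvWitness_maximumBooks : List Int := ([1, 2, 3] : List Int)

def Spec_maximumBooks (books : List Int) (out : Int) : Prop := out = maximumBooks_alt books
instance (books : List Int) (out : Int) : Decidable (Spec_maximumBooks books out) := by unfold Spec_maximumBooks; infer_instance

-- ===== CLAIM (what is proved, stated in full; the proofs are below) =====
def Claim_equal_maximumBooks : Prop := ∀ (books : List Int), Dom_maximumBooks books → Pre_maximumBooks books → Spec_maximumBooks books (maximumBooks books)

-- ===== LEMMAS AND PROOFS =====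

-- B's scan always lands strictly below its starting fuel (and at or above -1)
lemma scanB_bounds (books : List Int) (a : Int) : ∀ j : Nat, -1 ≤ scanB books a j ∧ scanB books a j ≤ (j : Int) - 1 := by
  intro j
  induction j with
  | zero => simp [scanB]
  | succ j ih =>
    simp only [scanB]
    split
    · obtain ⟨h1, h2⟩ := ih; push_cast; constructor <;> omega
    · push_cast; constructor <;> omega

-- a scan with a weaker threshold skips everything a stronger scan skipped
lemma scan_skip (books : List Int) : ∀ (j : Nat) (t a : Int), t ≤ a →
    scanB books t ((scanB books a j + 1).toNat) = scanB books t j := by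
  intro j
  induction j with
  | zero => intro t a _; rfl
  | succ j ih =>
    intro t a hta
    by_cases hc : PySem.List.pyGetD books (j : Int) 0 - (j : Int) ≥ a
    · have hct : PySem.List.pyGetD books (j : Int) 0 - (j : Int) ≥ t := le_trans hta hc
      rw [show scanB books a (j + 1) = scanB books a j from by simp only [scanB, if_pos hc],
        show scanB books t (j + 1) = scanB books t j from by simp only [scanB, if_pos hct]]
      exact ih t a hta
    · rw [show scanB books a (j + 1) = (j : Int) from by simp only [scanB, if_neg hc]]
      norm_num

-- the chain of boundaries: chain (j+1) = j :: chain at j's own boundary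
def chain (books : List Int) : Nat → List Int
  | 0 => []
  | j + 1 => (j : Int) :: chain books ((scanB books (PySem.List.pyGetD books (j : Int) 0 - (j : Int)) j + 1).toNat)
  decreasing_by
    have := (scanB_bounds books (PySem.List.pyGetD books (j : Int) 0 - (j : Int)) j).2
    omega

lemma chain_mem (books : List Int) : ∀ (fuel : Nat), ∀ j ∈ chain books fuel, 0 ≤ j ∧ j < (fuel : Int) := by
  intro fuel
  induction fuel using Nat.strong_induction_on with
  | _ fuel ih =>
    match fuel with
    | 0 => intro j hj; simp [chain] at hj
    | m + 1 =>
      intro j hj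
      rw [chain] at hj
      rcases List.mem_cons.mp hj with h | h
      · subst h; push_cast; constructor <;> omega
      · have hb := (scanB_bounds books (PySem.List.pyGetD books (m : Int) 0 - (m : Int)) m).2
        have := ih _ (by omega) j h
        push_cast at this ⊢; constructor <;> omega

-- A's pop loop on the chain (decorated with dp values) jumps exactly to B's scan result
lemma pop_chain (books dp : List Int) (i b : Int) : ∀ fuel : Nat,
    popA books i b ((chain books fuel).map (fun j => (j, PySem.List.pyGetD dp j 0)))
      = (chain books ((scanB books (b - i) fuel + 1).toNat)).map (fun j => (j, PySem.List.pyGetD dp j 0)) := by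
  intro fuel
  induction fuel using Nat.strong_induction_on with
  | _ fuel ih =>
    match fuel with
    | 0 => simp [chain, scanB, popA]
    | m + 1 =>
      rw [chain]
      simp only [List.map_cons, popA]
      by_cases hc : PySem.List.pyGetD books (m : Int) 0 - (m : Int) ≥ b - i
      · rw [if_pos (by omega)]
        have hb := (scanB_bounds books (PySem.List.pyGetD books (m : Int) 0 - (m : Int)) m).2
        rw [ih _ (by omega)]
        rw [scan_skip books m (b - i) _ hc]
        rw [show scanB books (b - i) (m + 1) = scanB books (b - i) m from by simp only [scanB, if_pos hc]]
      · rw [if_neg (by omega)]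
        rw [show scanB books (b - i) (m + 1) = (m : Int) from by simp only [scanB, if_neg hc]]
        rw [show ((m : Int) + 1).toNat = m + 1 from by omega]
        rw [chain]
        simp

lemma pyGetD_append_lt (dp : List Int) (c j : Int) (h0 : 0 ≤ j) (h1 : j < (dp.length : Int)) :
    PySem.List.pyGetD (dp ++ [c]) j 0 = PySem.List.pyGetD dp j 0 := by
  have h2 : j < (((dp ++ [c]).length : Nat) : Int) := by simp; omega
  rw [PySem.List.pyGetD_eq_getElem _ _ h0 h2, PySem.List.pyGetD_eq_getElem _ _ h0 h1]
  rw [List.getElem_append_left]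

lemma pyGetD_append_self (dp : List Int) (c : Int) :
    PySem.List.pyGetD (dp ++ [c]) (dp.length : Int) 0 = c := by
  rw [PySem.List.pyGetD_natCast]
  simp [List.getD_eq_getElem?_getD]

-- appending a fresh dp entry does not change the decoration of a chain of smaller indices
lemma chain_map_snoc (books dp : List Int) (c : Int) (K : Nat) (hK : K ≤ dp.length) :
    (chain books K).map (fun j => (j, PySem.List.pyGetD (dp ++ [c]) j 0))
      = (chain books K).map (fun j => (j, PySem.List.pyGetD dp j 0)) := by
  apply List.map_congr_left
  intro j hj
  have := chain_mem books K j hj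
  rw [pyGetD_append_lt dp c j this.1 (by omega)]

lemma drop_getD (books : List Int) (n : Nat) (b : Int) (rest : List Int) (h : books.drop n = b :: rest) :
    PySem.List.pyGetD books (n : Int) 0 = b := by
  have h0 : (books.drop n)[0]? = some b := by rw [h]; rfl
  rw [List.getElem?_drop] at h0
  rw [PySem.List.pyGetD_natCast, List.getD_eq_getElem?_getD]
  simpa using congrArg (Option.getD · 0) h0

-- the main invariant: A's stack is the boundary chain decorated with B's dp values
lemma loop_eq (books : List Int) : ∀ (s : List Int) (n : Nat) (dp : List Int) (res : Int),
    books.drop n = s → dp.length = n →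
    loopA books (n : Int) s ((chain books n).map (fun j => (j, PySem.List.pyGetD dp j 0))) res
      = loopB books n s dp res := by
  intro s
  induction s with
  | nil => intro n dp res _ _; rfl
  | cons b rest ih =>
    intro n dp res hdrop hlen
    have hb : PySem.List.pyGetD books (n : Int) 0 = b := drop_getD books n b rest hdrop
    simp only [loopA, loopB]
    rw [pop_chain books dp (n : Int) b n]
    set l := scanB books (b - (n : Int)) n with hl
    have hbnd := scanB_bounds books (b - (n : Int)) n
    rw [← hl] at hbnd
    -- the step values agree, and the new stack is the decorated chain at n+1
    have hchain : chain books (n + 1) = (n : Int) :: chain books ((l + 1).toNat) := by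
      rw [chain, hb, hl]
    have hdrop' : books.drop (n + 1) = rest := by
      have := congrArg List.tail hdrop
      simpa [List.tail_drop] using this
    by_cases h0 : 0 ≤ l
    · -- boundary exists: chain head carries dp[l]
      have hKpos : (l + 1).toNat = l.toNat + 1 := by omega
      have htb := (scanB_bounds books (PySem.List.pyGetD books (l.toNat : Int) 0 - (l.toNat : Int)) l.toNat).2
      have hhead : chain books ((l + 1).toNat) = (l.toNat : Int) :: chain books ((scanB books (PySem.List.pyGetD books (l.toNat : Int) 0 - (l.toNat : Int)) l.toNat + 1).toNat) := by
        rw [hKpos, chain]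
      have hcast : ((l.toNat : Nat) : Int) = l := by omega
      rw [hcast] at htb
      rw [hhead]
      simp only [List.map_cons, hcast, if_pos h0]
      rw [show b + b = 2 * b from by ring]
      set ct := PySem.List.pyGetD dp l 0 + PySem.Int.floordiv (min ((n : Int) - l) b * (2 * b - (min ((n : Int) - l) b) + 1)) 2 with hct
      have := ih (n + 1) (dp ++ [ct]) (max res ct) hdrop' (by simp [hlen])
      rw [hchain, hhead] at this
      simp only [List.map_cons, hcast] at this
      rw [chain_map_snoc books dp ct _ (by omega)] at this
      rw [pyGetD_append_lt dp ct l h0 (by omega)] at this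
      rw [← hlen, pyGetD_append_self dp ct, hlen] at this
      push_cast at this ⊢
      exact this
    · -- no boundary: l = -1, chain tail empty, prev = (-1, 0)
      have hK0 : (l + 1).toNat = 0 := by omega
      have hlm1 : l = -1 := by omega
      rw [hK0]
      simp only [chain, List.map_nil]
      rw [if_neg h0, hlm1]
      rw [show b + b = 2 * b from by ring]
      set ct := (0 : Int) + PySem.Int.floordiv (min ((n : Int) - -1) b * (2 * b - (min ((n : Int) - -1) b) + 1)) 2 with hct
      have := ih (n + 1) (dp ++ [ct]) (max res ct) hdrop' (by simp [hlen])
      rw [hchain, hK0] at this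
      simp only [chain, List.map_nil, List.map_cons] at this
      rw [← hlen, pyGetD_append_self dp ct, hlen] at this
      push_cast at this ⊢
      exact this

-- ===== VERDICT (by name: the statement is the Claim_ definition above) =====
theorem maximumBooks_spec : Claim_equal_maximumBooks := by
  intro books _ _
  unfold Spec_maximumBooks maximumBooks maximumBooks_alt
  have h := loop_eq books books 0 [] ((PySem.List.pyGet? books 0).getD 0) rfl rfl
  simpa [chain] using h
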